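-- pv_equiv track=rewrite | github.com/santiago120600/ADN_Mutante | src/main.py | diagonales_superiores
-- ===== SOURCE A (Python) =====
-- def checar_horizontal(matriz):
--     contador = 0
--     for fila in matriz:
--         # checar si se encuentra el patron AAAA TTTT CCCC GGGG
--         if fila.find("TTTT") != -1 or fila.find("AAAA") != -1 or fila.find("CCCC") != -1 or fila.find("GGGG") != -1:
--             contador +=1
--         else:
--             continue
--     return contador
--
-- def diagonales_superiores(matriz):
--     diagonales = []
--     filas = len(matriz)
--     columnas = len(matriz[0])
--     # Recorremos las diagonales verticales superiores
--     for j in range(columnas):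
--         diagonal = ''
--         i = 0  # Fila inicial
--         k = j  # Columna inicial
--         while i < filas and k < columnas:
--             diagonal += matriz[i][k]
--             i += 1
--             k += 1
--         diagonales.append(diagonal)
--     return checar_horizontal(diagonales)#['AAAATG'],['TGAGA'],['GTGA'],['CAA'],['GA'],['A']
-- ===== SOURCE B (Python) =====
-- def diagonales_superiores(matriz):
--     filas = len(matriz)
--     columnas = len(matriz[0])
--     total = 0
--     for j in range(columnas):
--         L = min(filas, columnas - j)
--         if any(matriz[t][j + t] in "ATCG"
--                and matriz[t][j + t] == matriz[t + 1][j + t + 1]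
--                    == matriz[t + 2][j + t + 2] == matriz[t + 3][j + t + 3]
--                for t in range(L - 3)):
--             total += 1
--     return total
-- ===== Notes on version B (the rewrite author's own statement) =====
-- stated objective: alternative
-- what changed: B never materialises the diagonal strings or calls str.find: for each start column it scans 4-cell windows along the diagonal directly in the matrix and counts a column when some window holds one repeated base A/T/C/G.
-- outside the precondition, e.g. on diagonales_superiores([]): A raises IndexError, B raises IndexError; on diagonales_superiores(['AB', 'C']): A raises IndexError, B returns 0
import Mathlib
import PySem

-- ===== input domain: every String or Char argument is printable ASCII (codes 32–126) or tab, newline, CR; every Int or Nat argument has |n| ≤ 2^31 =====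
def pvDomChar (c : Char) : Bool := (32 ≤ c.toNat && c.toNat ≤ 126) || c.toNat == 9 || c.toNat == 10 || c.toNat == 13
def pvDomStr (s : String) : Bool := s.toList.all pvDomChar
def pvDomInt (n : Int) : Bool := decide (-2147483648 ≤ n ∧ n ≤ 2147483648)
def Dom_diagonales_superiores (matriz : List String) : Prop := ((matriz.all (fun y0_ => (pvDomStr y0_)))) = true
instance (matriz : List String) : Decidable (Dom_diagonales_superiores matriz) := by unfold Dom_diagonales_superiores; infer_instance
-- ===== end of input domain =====

-- B drops the diagonal-string building and str.find of A: it counts, per start column,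
-- whether some 4-cell diagonal window holds one repeated base, read straight off the matrix
-- (objective: alternative decomposition, same asymptotic cost).

-- ===== PORT A =====
-- matriz[i][k] for in-range nat indices (Pre_ guarantees in range; default never read inside Pre_)
def pvCell (m : List String) (i k : Nat) : Char := ((m.getD i "").toList).getD k ' '

-- the while-loop of A: diagonal += matriz[i][k]; i += 1; k += 1
def pvBuild (m : List String) (filas columnas : Nat) (i k : Nat) (acc : List Char) : List Char :=
  if _h : i < filas ∧ k < columnas then
    pvBuild m filas columnas (i + 1) (k + 1) (acc ++ [pvCell m i k])
  else acc
termination_by filas - i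
decreasing_by omega

-- checar_horizontal, over the list of diagonal strings (as char lists)
def pvChecar (ds : List (List Char)) : Int :=
  ds.foldl (fun contador fila =>
    if PySem.Chars.find fila ['T','T','T','T'] ≠ -1 ∨ PySem.Chars.find fila ['A','A','A','A'] ≠ -1 ∨
       PySem.Chars.find fila ['C','C','C','C'] ≠ -1 ∨ PySem.Chars.find fila ['G','G','G','G'] ≠ -1
    then contador + 1 else contador) 0

def diagonales_superiores (matriz : List String) : Int :=
  let filas := matriz.length
  let columnas := (matriz.getD 0 "").toList.length
  let diagonales := (List.range columnas).foldl
    (fun acc j => acc ++ [pvBuild matriz filas columnas 0 j []]) []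
  pvChecar diagonales

-- ===== PORT B =====
-- one 4-cell window on the diagonal starting at column j, offset t
def pvWin (m : List String) (j t : Nat) : Bool :=
  (['A','T','C','G'].contains (pvCell m t (j + t)))
  && (pvCell m (t + 1) (j + t + 1) == pvCell m t (j + t))
  && (pvCell m (t + 2) (j + t + 2) == pvCell m t (j + t))
  && (pvCell m (t + 3) (j + t + 3) == pvCell m t (j + t))

def diagonales_superiores_alt (matriz : List String) : Int :=
  let filas := matriz.length
  let columnas := (matriz.getD 0 "").toList.length
  (List.range columnas).foldl
    (fun total j =>
      let L := min filas (columnas - j)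
      if (List.range (L - 3)).any (fun t => pvWin matriz j t) then total + 1 else total) 0

-- ===== PRECONDITION & SPEC =====
-- A raises IndexError on an empty matrix (matriz[0]) and on matrices whose first
-- min(filas, columnas) rows are shorter than row 0 (matriz[i][k]); exactly those are excluded.
def Pre_diagonales_superiores (matriz : List String) : Prop :=
  matriz ≠ [] ∧
  ∀ s ∈ matriz.take ((matriz.getD 0 "").toList.length),
    (matriz.getD 0 "").toList.length ≤ s.toList.length
instance (matriz : List String) : Decidable (Pre_diagonales_superiores matriz) := by
  unfold Pre_diagonales_superiores; infer_instance

def pvWitness_diagonales_superiores : List String := ["AAAT", "GAAG", "TCAC", "CCGA"]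

def Spec_diagonales_superiores (matriz : List String) (out : Int) : Prop := out = diagonales_superiores_alt matriz
instance (matriz : List String) (out : Int) : Decidable (Spec_diagonales_superiores matriz out) := by unfold Spec_diagonales_superiores; infer_instance

-- ===== CLAIM (what is proved, stated in full; the proofs are below) =====
def Claim_equal_diagonales_superiores : Prop := ∀ (matriz : List String), Dom_diagonales_superiores matriz → Pre_diagonales_superiores matriz → Spec_diagonales_superiores matriz (diagonales_superiores matriz)

-- ===== LEMMAS AND PROOFS =====

-- A's while loop produces exactly the cells of the diagonal
theorem pvBuild_eq (m : List String) (f c : Nat) :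
    ∀ n i k acc, f - i ≤ n → pvBuild m f c i k acc
      = acc ++ (List.range (min (f - i) (c - k))).map (fun t => pvCell m (i + t) (k + t)) := by
  intro n
  induction n with
  | zero =>
      intro i k acc h
      rw [pvBuild]
      rw [dif_neg (by omega)]
      have : min (f - i) (c - k) = 0 := by omega
      simp [this]
  | succ n ih =>
      intro i k acc h
      rw [pvBuild]
      split_ifs with hc
      · rw [ih (i + 1) (k + 1) _ (by omega)]
        have hmin : min (f - i) (c - k) = min (f - (i + 1)) (c - (k + 1)) + 1 := by omega
        rw [hmin, List.range_succ_eq_map]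
        simp [List.map_map, Function.comp]
        intro a _ _; ring_nf
      · have : min (f - i) (c - k) = 0 := by omega
        simp [this]

-- (proof helper) range lookup as an if
theorem pvRangeGet (n i : Nat) : (List.range n)[i]? = if i < n then some i else none := by
  split_ifs with h
  · exact List.getElem?_range h
  · exact List.getElem?_eq_none (by simpa using h)

-- a 4-repeat prefix, elementwise
theorem prefix4_iff (cc : Char) (xs : List Char) :
    [cc, cc, cc, cc] <+: xs ↔
      xs[0]? = some cc ∧ xs[1]? = some cc ∧ xs[2]? = some cc ∧ xs[3]? = some cc := by
  match xs with
  | [] => simp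
  | [a] => simp [List.cons_prefix_cons]
  | [a, b] => simp [List.cons_prefix_cons]
  | [a, b, d] => simp [List.cons_prefix_cons]
  | a :: b :: d :: e :: rest =>
      simp only [List.cons_prefix_cons, List.getElem?_cons_zero, List.getElem?_cons_succ]
      simp [eq_comm]

-- a 4-repeat infix of the diagonal ↔ some window of 4 equal cells
theorem run_iff (g : Nat → Char) (L : Nat) (cc : Char) :
    ([cc, cc, cc, cc] <:+: (List.range L).map g) ↔
      ∃ t, t + 3 < L ∧ g t = cc ∧ g (t + 1) = cc ∧ g (t + 2) = cc ∧ g (t + 3) = cc := by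
  rw [← PySem.Chars.isIn_iff_infix, ← PySem.Chars.exists_prefix_drop_iff_isIn]
  constructor
  · rintro ⟨t, ht⟩
    rw [prefix4_iff] at ht
    simp only [List.getElem?_drop, List.getElem?_map, pvRangeGet] at ht
    obtain ⟨h0, h1, h2, h3⟩ := ht
    have hL : t + 3 < L := by
      by_contra hcon
      rw [if_neg (by omega)] at h3
      simp at h3
    rw [if_pos (by omega)] at h0 h1 h2 h3
    simp only [Option.map_some, Option.some.injEq] at h0 h1 h2 h3
    exact ⟨t, hL, by simpa using h0, h1, h2, h3⟩
  · rintro ⟨t, hlt, e0, e1, e2, e3⟩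
    refine ⟨t, ?_⟩
    rw [prefix4_iff]
    simp only [List.getElem?_drop, List.getElem?_map, pvRangeGet]
    refine ⟨?_, ?_, ?_, ?_⟩ <;> rw [if_pos (by omega)] <;>
      simp only [Option.map_some, Option.some.injEq]
    · simpa using e0
    · exact e1
    · exact e2
    · exact e3

-- per start column: A's pattern test on the diagonal string ↔ B's window scan
theorem pvKey (m : List String) (f c j : Nat) :
    (PySem.Chars.find ((List.range (min f (c - j))).map (fun t => pvCell m t (j + t))) ['T','T','T','T'] ≠ -1 ∨
     PySem.Chars.find ((List.range (min f (c - j))).map (fun t => pvCell m t (j + t))) ['A','A','A','A'] ≠ -1 ∨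
     PySem.Chars.find ((List.range (min f (c - j))).map (fun t => pvCell m t (j + t))) ['C','C','C','C'] ≠ -1 ∨
     PySem.Chars.find ((List.range (min f (c - j))).map (fun t => pvCell m t (j + t))) ['G','G','G','G'] ≠ -1)
    ↔ (List.range (min f (c - j) - 3)).any (fun t => pvWin m j t) = true := by
  simp only [PySem.Chars.find_ne_neg_one_iff, run_iff, List.any_eq_true, List.mem_range]
  have hwin : ∀ t, pvWin m j t = true ↔
      (pvCell m t (j + t) = 'A' ∨ pvCell m t (j + t) = 'T' ∨
       pvCell m t (j + t) = 'C' ∨ pvCell m t (j + t) = 'G') ∧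
      pvCell m (t + 1) (j + (t + 1)) = pvCell m t (j + t) ∧
      pvCell m (t + 2) (j + (t + 2)) = pvCell m t (j + t) ∧
      pvCell m (t + 3) (j + (t + 3)) = pvCell m t (j + t) := by
    intro t
    simp [pvWin, Nat.add_assoc, and_assoc]
  constructor
  · rintro (⟨t, h, e0, e1, e2, e3⟩ | ⟨t, h, e0, e1, e2, e3⟩ | ⟨t, h, e0, e1, e2, e3⟩ | ⟨t, h, e0, e1, e2, e3⟩) <;>
      exact ⟨t, by omega, (hwin t).2 ⟨by simp [e0], by rw [e1, e0], by rw [e2, e0], by rw [e3, e0]⟩⟩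
  · rintro ⟨t, ht, hw⟩
    obtain ⟨hmem, h1, h2, h3⟩ := (hwin t).1 hw
    rcases hmem with e | e | e | e
    · exact Or.inr (Or.inl ⟨t, by omega, e, h1.trans e, h2.trans e, h3.trans e⟩)
    · exact Or.inl ⟨t, by omega, e, h1.trans e, h2.trans e, h3.trans e⟩
    · exact Or.inr (Or.inr (Or.inl ⟨t, by omega, e, h1.trans e, h2.trans e, h3.trans e⟩))
    · exact Or.inr (Or.inr (Or.inr ⟨t, by omega, e, h1.trans e, h2.trans e, h3.trans e⟩))

-- ===== VERDICT (by name: the statement is the Claim_ definition above) =====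
theorem diagonales_superiores_spec : Claim_equal_diagonales_superiores := by
  intro matriz _hdom _hpre
  unfold Spec_diagonales_superiores diagonales_superiores diagonales_superiores_alt
  dsimp only
  rw [PySem.List.foldl_append_singleton_eq_map]
  simp only [List.nil_append]
  rw [show (List.map (fun j => pvBuild matriz matriz.length ((matriz.getD 0 "").toList.length) 0 j [])
        (List.range ((matriz.getD 0 "").toList.length)))
      = List.map (fun j => (List.range (min matriz.length ((matriz.getD 0 "").toList.length - j))).map
          (fun t => pvCell matriz t (j + t))) (List.range ((matriz.getD 0 "").toList.length))
    from List.map_congr_left (fun j _ => by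
      rw [pvBuild_eq matriz _ _ matriz.length 0 j [] (by omega)]; simp)]
  unfold pvChecar
  rw [List.foldl_map]
  apply PySem.List.foldl_congr_mem
  intro acc j _
  by_cases h : (List.range (min matriz.length ((matriz.getD 0 "").toList.length - j) - 3)).any
      (fun t => pvWin matriz j t) = true
  · rw [if_pos ((pvKey matriz matriz.length _ j).2 h), if_pos h]
  · rw [if_neg (fun hc => h ((pvKey matriz matriz.length _ j).1 hc)), if_neg h]
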